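-- pv_equiv track=rewrite | github.com/Lokii-git/seeksweet | ldapseek/ldapseek.py | identify_asrep_users
-- ===== SOURCE A (Python) =====
-- UAC_FLAGS = {
--     0x0001: 'SCRIPT',
--     0x0002: 'ACCOUNTDISABLE',
--     0x0008: 'HOMEDIR_REQUIRED',
--     0x0010: 'LOCKOUT',
--     0x0020: 'PASSWD_NOTREQD',
--     0x0040: 'PASSWD_CANT_CHANGE',
--     0x0080: 'ENCRYPTED_TEXT_PWD_ALLOWED',
--     0x0100: 'TEMP_DUPLICATE_ACCOUNT',
--     0x0200: 'NORMAL_ACCOUNT',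
--     0x0800: 'INTERDOMAIN_TRUST_ACCOUNT',
--     0x1000: 'WORKSTATION_TRUST_ACCOUNT',
--     0x2000: 'SERVER_TRUST_ACCOUNT',
--     0x10000: 'DONT_EXPIRE_PASSWORD',
--     0x20000: 'MNS_LOGON_ACCOUNT',
--     0x40000: 'SMARTCARD_REQUIRED',
--     0x80000: 'TRUSTED_FOR_DELEGATION',
--     0x100000: 'NOT_DELEGATED',
--     0x200000: 'USE_DES_KEY_ONLY',
--     0x400000: 'DONT_REQ_PREAUTH',
--     0x800000: 'PASSWORD_EXPIRED',
--     0x1000000: 'TRUSTED_TO_AUTH_FOR_DELEGATION'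
-- }
--
-- def parse_uac_flags(uac_value):
--     """Parse User Account Control flags"""
--     flags = []
--     for flag_value, flag_name in UAC_FLAGS.items():
--         if uac_value & flag_value:
--             flags.append(flag_name)
--     return flags
--
-- def identify_asrep_users(users):
--     """Identify users vulnerable to ASREPRoasting"""
--     asrep_users = []
--     for user in users:
--         if 'uac' in user:
--             flags = parse_uac_flags(user['uac'])
--             # DONT_REQ_PREAUTH = no Kerberos pre-authentication
--             if 'DONT_REQ_PREAUTH' in flags:
--                 asrep_users.append(user)
--     return asrep_users
-- ===== SOURCE B (Python) =====
-- DONT_REQ_PREAUTH = 0x400000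
--
-- def identify_asrep_users(users):
--     """Identify users vulnerable to ASREPRoasting"""
--     return [user for user in users
--             if 'uac' in user and user['uac'] & DONT_REQ_PREAUTH]
-- ===== Notes on version B (the rewrite author's own statement) =====
-- stated objective: idiomatic
-- what changed: Eliminates parse_uac_flags entirely: instead of building the full 21-name flag list per user and searching it for 'DONT_REQ_PREAUTH', B is one list comprehension with a single direct bitmask test (uac & 0x400000), so the inner loop over all UAC_FLAGS disappears.
import Mathlib
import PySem

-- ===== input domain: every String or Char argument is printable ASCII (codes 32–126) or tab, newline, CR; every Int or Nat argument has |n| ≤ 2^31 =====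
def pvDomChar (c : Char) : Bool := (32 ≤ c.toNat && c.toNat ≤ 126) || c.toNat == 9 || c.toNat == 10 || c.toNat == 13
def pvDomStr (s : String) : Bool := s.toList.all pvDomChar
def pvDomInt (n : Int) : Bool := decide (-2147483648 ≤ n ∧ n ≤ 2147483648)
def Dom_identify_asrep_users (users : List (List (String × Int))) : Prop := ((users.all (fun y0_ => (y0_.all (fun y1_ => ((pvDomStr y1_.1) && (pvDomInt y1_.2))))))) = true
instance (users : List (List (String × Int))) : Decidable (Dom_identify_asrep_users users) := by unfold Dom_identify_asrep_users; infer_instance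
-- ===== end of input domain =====

-- B replaces A's per-user flag-name list construction and search with one direct bitmask test (idiomatic)


-- ===== PORT A =====
-- A's module constant UAC_FLAGS (dict int->str, iterated in insertion order)
def UAC_FLAGS : List (Int × String) :=
  [(0x0001, "SCRIPT"), (0x0002, "ACCOUNTDISABLE"), (0x0008, "HOMEDIR_REQUIRED"),
   (0x0010, "LOCKOUT"), (0x0020, "PASSWD_NOTREQD"), (0x0040, "PASSWD_CANT_CHANGE"),
   (0x0080, "ENCRYPTED_TEXT_PWD_ALLOWED"), (0x0100, "TEMP_DUPLICATE_ACCOUNT"),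
   (0x0200, "NORMAL_ACCOUNT"), (0x0800, "INTERDOMAIN_TRUST_ACCOUNT"),
   (0x1000, "WORKSTATION_TRUST_ACCOUNT"), (0x2000, "SERVER_TRUST_ACCOUNT"),
   (0x10000, "DONT_EXPIRE_PASSWORD"), (0x20000, "MNS_LOGON_ACCOUNT"),
   (0x40000, "SMARTCARD_REQUIRED"), (0x80000, "TRUSTED_FOR_DELEGATION"),
   (0x100000, "NOT_DELEGATED"), (0x200000, "USE_DES_KEY_ONLY"),
   (0x400000, "DONT_REQ_PREAUTH"), (0x800000, "PASSWORD_EXPIRED"),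
   (0x1000000, "TRUSTED_TO_AUTH_FOR_DELEGATION")]

-- 'if uac_value & flag_value:' — Python truthiness of an int = nonzero
def parse_uac_flags (uac_value : Int) : List String :=
  UAC_FLAGS.foldl
    (fun flags p => if PySem.Int.band uac_value p.1 ≠ 0 then flags ++ [p.2] else flags) []

def identify_asrep_users (users : List (List (String × Int))) : List (List (String × Int)) :=
  users.foldl
    (fun asrep_users user =>
      match user.lookup "uac" with      -- "'uac' in user" then "user['uac']" (first match)
      | some v =>
          let flags := parse_uac_flags v
          if "DONT_REQ_PREAUTH" ∈ flags then asrep_users ++ [user] else asrep_users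
      | none => asrep_users) []

-- ===== PORT B =====
-- B: one list comprehension, direct bitmask test, no flag-name list
def identify_asrep_users_alt (users : List (List (String × Int))) : List (List (String × Int)) :=
  users.filter (fun user =>
    match user.lookup "uac" with
    | some v => decide (PySem.Int.band v 0x400000 ≠ 0)
    | none => false)

-- ===== PRECONDITION & SPEC =====
def Spec_identify_asrep_users (users : List (List (String × Int))) (out : List (List (String × Int))) : Prop := out = identify_asrep_users_alt users
instance (users : List (List (String × Int))) (out : List (List (String × Int))) : Decidable (Spec_identify_asrep_users users out) := by unfold Spec_identify_asrep_users; infer_instance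

-- ===== CLAIM (what is proved, stated in full; the proofs are below) =====
def Claim_equal_identify_asrep_users : Prop := ∀ (users : List (List (String × Int))), Dom_identify_asrep_users users → Spec_identify_asrep_users users (identify_asrep_users users)

-- ===== LEMMAS AND PROOFS =====


-- membership in A's flag-accumulating fold, characterised
theorem mem_foldl_flags (v : Int) (l : List (Int × String)) (acc : List String) (s : String) :
    (s ∈ l.foldl (fun fl p => if PySem.Int.band v p.1 ≠ 0 then fl ++ [p.2] else fl) acc) ↔
      s ∈ acc ∨ ∃ p ∈ l, PySem.Int.band v p.1 ≠ 0 ∧ p.2 = s := by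
  induction l generalizing acc with
  | nil => simp
  | cons h t ih =>
    rw [List.foldl_cons, ih]
    by_cases hc : PySem.Int.band v h.1 ≠ 0 <;> simp [hc] <;> tauto

-- the flag-list membership test is exactly the DONT_REQ_PREAUTH bit test
theorem mem_parse (v : Int) :
    ("DONT_REQ_PREAUTH" ∈ parse_uac_flags v) ↔ PySem.Int.band v 0x400000 ≠ 0 := by
  rw [parse_uac_flags, mem_foldl_flags]
  simp [UAC_FLAGS]

theorem identify_foldl_eq_filter (users : List (List (String × Int)))
    (acc : List (List (String × Int))) :
    (users.foldl
      (fun asrep_users user =>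
        match user.lookup "uac" with
        | some v =>
            let flags := parse_uac_flags v
            if "DONT_REQ_PREAUTH" ∈ flags then asrep_users ++ [user] else asrep_users
        | none => asrep_users) acc) =
      acc ++ users.filter (fun user =>
        match user.lookup "uac" with
        | some v => decide (PySem.Int.band v 0x400000 ≠ 0)
        | none => false) := by
  induction users generalizing acc with
  | nil => simp
  | cons u t ih =>
    rw [List.foldl_cons, List.filter_cons]
    cases hl : u.lookup "uac" with
    | none => simp only [hl]; rw [ih]; simp
    | some v =>
      simp only [hl]
      by_cases hb : PySem.Int.band v 0x400000 ≠ 0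
      · rw [if_pos ((mem_parse v).mpr hb), ih, if_pos (by simpa using hb)]
        simp
      · rw [if_neg (by rw [mem_parse]; exact hb), ih, if_neg (by simpa using hb)]

-- ===== VERDICT (by name: the statement is the Claim_ definition above) =====
theorem identify_asrep_users_spec : Claim_equal_identify_asrep_users := by
  intro users _
  unfold Spec_identify_asrep_users identify_asrep_users identify_asrep_users_alt
  simpa using identify_foldl_eq_filter users []
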